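-- pv_equiv track=rewrite | github.com/rainvare/organizational-knowledge-harness | parsers/behance_parser.py | _prioritize_images
-- ===== SOURCE A (Python) =====
-- def _prioritize_images(urls: list) -> list:
--     """Prefer high-resolution Behance images (contain 'max_1200' or similar)."""
--     def score(u):
--         if "max_1200" in u or "max_3840" in u:
--             return 3
--         if "max_800" in u or "max_900" in u:
--             return 2
--         if any(x in u for x in (".jpg", ".jpeg", ".png", ".webp")):
--             return 1
--         return 0
--     seen = set()
--     result = []
--     for u in sorted(urls, key=score, reverse=True):
--         if u not in seen:
--             seen.add(u)
--             result.append(u)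
--     return result
-- ===== SOURCE B (Python) =====
-- def _prioritize_images(urls: list) -> list:
--     """Prefer high-resolution Behance images (contain 'max_1200' or similar)."""
--     def score(u):
--         if "max_1200" in u or "max_3840" in u:
--             return 3
--         if "max_800" in u or "max_900" in u:
--             return 2
--         if any(x in u for x in (".jpg", ".jpeg", ".png", ".webp")):
--             return 1
--         return 0
--     buckets = ([], [], [], [])
--     seen = set()
--     for u in urls:
--         if u not in seen:
--             seen.add(u)
--             buckets[score(u)].append(u)
--     return buckets[3] + buckets[2] + buckets[1] + buckets[0]
-- ===== Notes on version B (the rewrite author's own statement) =====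
-- stated objective: faster
-- what changed: Replaces the stable descending sort followed by a dedup pass with a single pass that drops duplicates and drops each new URL into one of four score buckets, then concatenates the buckets from score 3 down to 0.
import Mathlib
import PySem

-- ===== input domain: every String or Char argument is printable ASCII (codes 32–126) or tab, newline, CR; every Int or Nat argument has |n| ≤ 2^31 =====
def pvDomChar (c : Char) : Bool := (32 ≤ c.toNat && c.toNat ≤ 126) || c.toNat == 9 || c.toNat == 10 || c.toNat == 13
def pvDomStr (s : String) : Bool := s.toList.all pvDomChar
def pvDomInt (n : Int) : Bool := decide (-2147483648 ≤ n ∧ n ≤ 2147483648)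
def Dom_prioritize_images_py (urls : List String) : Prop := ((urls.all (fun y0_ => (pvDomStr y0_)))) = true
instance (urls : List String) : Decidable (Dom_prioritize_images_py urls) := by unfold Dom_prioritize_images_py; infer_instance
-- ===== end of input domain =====

-- B replaces A's stable descending sort + dedup pass with one pass into four score buckets
-- (dedup on the fly), concatenated from score 3 down to 0: O(n) instead of O(n log n).


-- shared scoring helper (identical inner `score` function in both Pythons)
def pvScore (u : String) : Int :=
  if PySem.Str.isIn "max_1200" u || PySem.Str.isIn "max_3840" u then 3
  else if PySem.Str.isIn "max_800" u || PySem.Str.isIn "max_900" u then 2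
  else if PySem.Str.isIn ".jpg" u || PySem.Str.isIn ".jpeg" u
       || PySem.Str.isIn ".png" u || PySem.Str.isIn ".webp" u then 1
  else 0

-- ===== PORT A =====
def prioritize_images_py (urls : List String) : List String :=
  ((PySem.List.sorted urls pvScore true).foldl
    (fun (st : PySem.Set String × List String) u =>
      if st.1.contains u then st else (PySem.Set.add st.1 u, st.2 ++ [u]))
    (PySem.Set.empty, [])).2

-- ===== PORT B =====
def prioritize_images_py_alt (urls : List String) : List String :=
  let st := urls.foldl
    (fun (st : PySem.Set String × List String × List String × List String × List String) u =>
      if st.1.contains u then st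
      else
        let s := pvScore u
        if s = 3 then (PySem.Set.add st.1 u, st.2.1 ++ [u], st.2.2.1, st.2.2.2.1, st.2.2.2.2)
        else if s = 2 then (PySem.Set.add st.1 u, st.2.1, st.2.2.1 ++ [u], st.2.2.2.1, st.2.2.2.2)
        else if s = 1 then (PySem.Set.add st.1 u, st.2.1, st.2.2.1, st.2.2.2.1 ++ [u], st.2.2.2.2)
        else (PySem.Set.add st.1 u, st.2.1, st.2.2.1, st.2.2.2.1, st.2.2.2.2 ++ [u]))
    (PySem.Set.empty, [], [], [], [])
  st.2.1 ++ st.2.2.1 ++ st.2.2.2.1 ++ st.2.2.2.2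

-- ===== PRECONDITION & SPEC =====
def Spec_prioritize_images_py (urls : List String) (out : List String) : Prop := out = prioritize_images_py_alt urls
instance (urls : List String) (out : List String) : Decidable (Spec_prioritize_images_py urls out) := by unfold Spec_prioritize_images_py; infer_instance

-- ===== CLAIM (what is proved, stated in full; the proofs are below) =====
def Claim_equal_prioritize_images_py : Prop := ∀ (urls : List String), Dom_prioritize_images_py urls → Spec_prioritize_images_py urls (prioritize_images_py urls)

-- ===== LEMMAS AND PROOFS =====

-- the filter "bucket" of score i over a prefix
def pvF (i : Int) (p : List String) : List String := p.filter (fun u => decide (pvScore u = i))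

theorem pvScore_cases (u : String) : pvScore u = 0 ∨ pvScore u = 1 ∨ pvScore u = 2 ∨ pvScore u = 3 := by
  unfold pvScore; split_ifs <;> simp

theorem pvScore_of_mem_F {i : Int} {p : List String} {y : String} (h : y ∈ pvF i p) : pvScore y = i := by
  unfold pvF at h
  simpa using (List.mem_filter.mp h).2

theorem insertBy_skip {α : Type} (before : α → α → Bool) (x : α) (l r : List α)
    (hl : ∀ y ∈ l, before x y = false) :
    PySem.List.insertBy before x (l ++ r) = l ++ PySem.List.insertBy before x r := by
  induction l with
  | nil => simp
  | cons a t ih =>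
    have ha : before x a = false := hl a (by simp)
    simp only [List.cons_append, PySem.List.insertBy, ha]
    simp [ih (fun y hy => hl y (by simp [hy]))]

theorem insertBy_mid {α : Type} (before : α → α → Bool) (x : α) (l r : List α)
    (hl : ∀ y ∈ l, before x y = false) (hr : ∀ z ∈ r, before x z = true) :
    PySem.List.insertBy before x (l ++ r) = l ++ x :: r := by
  rw [insertBy_skip before x l r hl]
  cases r with
  | nil => simp [PySem.List.insertBy]
  | cons z zs => simp [PySem.List.insertBy, hr z (by simp)]

theorem sorted_buckets (urls : List String) :
    PySem.List.sorted urls pvScore true = pvF 3 urls ++ pvF 2 urls ++ pvF 1 urls ++ pvF 0 urls := by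
  rw [PySem.List.sorted_rev_eq_foldl_insertBy]
  induction urls using List.reverseRecOn with
  | nil => rfl
  | append_singleton p x ih =>
    rw [List.foldl_append, List.foldl_cons, List.foldl_nil, ih]
    have hF : ∀ i : Int, pvF i (p ++ [x]) = pvF i p ++ pvF i [x] := by
      intro i; unfold pvF; simp [List.filter_append]
    have hmem : ∀ (i : Int) (y : String), y ∈ pvF i p → pvScore y = i := fun i y => pvScore_of_mem_F
    rcases pvScore_cases x with hs | hs | hs | hs
    · -- score 0: insert at the very end
      have := insertBy_mid (fun a b => decide (pvScore b < pvScore a)) x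
        (pvF 3 p ++ pvF 2 p ++ pvF 1 p ++ pvF 0 p) []
        (by intro y hy; simp only [List.mem_append] at hy
            rcases hy with ((h3 | h2) | h1) | h0
            · simp [hmem 3 y h3, hs]
            · simp [hmem 2 y h2, hs]
            · simp [hmem 1 y h1, hs]
            · simp [hmem 0 y h0, hs])
        (by intro z hz; simp at hz)
      simp only [List.append_nil] at this
      rw [this]
      simp [pvF, hs, List.append_assoc]
    · -- score 1
      have := insertBy_mid (fun a b => decide (pvScore b < pvScore a)) x
        (pvF 3 p ++ pvF 2 p ++ pvF 1 p) (pvF 0 p)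
        (by intro y hy; simp only [List.mem_append] at hy
            rcases hy with (h3 | h2) | h1
            · simp [hmem 3 y h3, hs]
            · simp [hmem 2 y h2, hs]
            · simp [hmem 1 y h1, hs])
        (by intro z hz; simp [hmem 0 z hz, hs])
      rw [show pvF 3 p ++ pvF 2 p ++ pvF 1 p ++ pvF 0 p
            = (pvF 3 p ++ pvF 2 p ++ pvF 1 p) ++ pvF 0 p by simp [List.append_assoc],
         this]
      simp [pvF, hs, List.append_assoc]
    · -- score 2
      have := insertBy_mid (fun a b => decide (pvScore b < pvScore a)) x
        (pvF 3 p ++ pvF 2 p) (pvF 1 p ++ pvF 0 p)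
        (by intro y hy; simp only [List.mem_append] at hy
            rcases hy with h3 | h2
            · simp [hmem 3 y h3, hs]
            · simp [hmem 2 y h2, hs])
        (by intro z hz; simp only [List.mem_append] at hz
            rcases hz with h1 | h0
            · simp [hmem 1 z h1, hs]
            · simp [hmem 0 z h0, hs])
      rw [show pvF 3 p ++ pvF 2 p ++ pvF 1 p ++ pvF 0 p
            = (pvF 3 p ++ pvF 2 p) ++ (pvF 1 p ++ pvF 0 p) by simp [List.append_assoc],
         this]
      simp [pvF, hs, List.append_assoc]
    · -- score 3
      have := insertBy_mid (fun a b => decide (pvScore b < pvScore a)) x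
        (pvF 3 p) (pvF 2 p ++ pvF 1 p ++ pvF 0 p)
        (by intro y hy; simp [hmem 3 y hy, hs])
        (by intro z hz; simp only [List.mem_append] at hz
            rcases hz with (h2 | h1) | h0
            · simp [hmem 2 z h2, hs]
            · simp [hmem 1 z h1, hs]
            · simp [hmem 0 z h0, hs])
      rw [show pvF 3 p ++ pvF 2 p ++ pvF 1 p ++ pvF 0 p
            = pvF 3 p ++ (pvF 2 p ++ pvF 1 p ++ pvF 0 p) by simp [List.append_assoc],
         this]
      simp [pvF, hs, List.append_assoc]

-- A's dedup loop keeps seen = result; its result is Set.ofList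
theorem dedup_loop_diag (xs : List String) (s : PySem.Set String) :
    (xs.foldl (fun (st : PySem.Set String × List String) u =>
        if st.1.contains u then st else (PySem.Set.add st.1 u, st.2 ++ [u])) (s, s)).2
      = xs.foldl PySem.Set.add s := by
  induction xs generalizing s with
  | nil => rfl
  | cons u t ih =>
    simp only [List.foldl_cons]
    by_cases h : s.contains u
    · rw [if_pos h, show PySem.Set.add s u = s from by unfold PySem.Set.add; rw [if_pos h]]
      exact ih s
    · rw [if_neg h, show PySem.Set.add s u = s ++ [u] from by unfold PySem.Set.add; rw [if_neg h]]
      exact ih (s ++ [u])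

theorem A_char (urls : List String) :
    prioritize_images_py urls = PySem.Set.ofList (PySem.List.sorted urls pvScore true) := by
  unfold prioritize_images_py
  rw [PySem.Set.ofList_eq_foldl]
  exact dedup_loop_diag _ []

theorem foldl_add_shift (ys s t : List String) (h : ∀ y ∈ ys, y ∉ s) :
    ys.foldl PySem.Set.add (s ++ t) = s ++ ys.foldl PySem.Set.add t := by
  induction ys generalizing t with
  | nil => rfl
  | cons y ys ih =>
    have hy : y ∉ s := h y (by simp)
    have htail : ∀ z ∈ ys, z ∉ s := fun z hz => h z (by simp [hz])
    have hc : PySem.Set.contains (s ++ t) y = PySem.Set.contains t y := by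
      simp [PySem.Set.contains, List.contains_eq_mem, hy]
    simp only [List.foldl_cons]
    by_cases hcy : PySem.Set.contains t y = true
    · rw [show PySem.Set.add (s ++ t) y = s ++ t from by
          unfold PySem.Set.add; rw [if_pos (hc.trans hcy)],
        show PySem.Set.add t y = t from by unfold PySem.Set.add; rw [if_pos hcy]]
      exact ih t htail
    · have hcy' : PySem.Set.contains t y = false := by simpa using hcy
      rw [show PySem.Set.add (s ++ t) y = s ++ (t ++ [y]) from by
          unfold PySem.Set.add; rw [if_neg (by rw [hc, hcy']; exact Bool.false_ne_true), List.append_assoc],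
        show PySem.Set.add t y = t ++ [y] from by
          unfold PySem.Set.add; rw [if_neg (by rw [hcy']; exact Bool.false_ne_true)]]
      exact ih (t ++ [y]) htail

theorem ofList_append_disjoint (xs ys : List String) (h : ∀ y ∈ ys, y ∉ xs) :
    PySem.Set.ofList (xs ++ ys) = PySem.Set.ofList xs ++ PySem.Set.ofList ys := by
  rw [PySem.Set.ofList_eq_foldl, PySem.Set.ofList_eq_foldl, PySem.Set.ofList_eq_foldl,
      List.foldl_append]
  have hmem : ∀ y ∈ ys, y ∉ List.foldl PySem.Set.add [] xs := by
    intro y hy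
    rw [← PySem.Set.ofList_eq_foldl, PySem.Set.mem_ofList]
    exact h y hy
  calc List.foldl PySem.Set.add (List.foldl PySem.Set.add [] xs) ys
      = List.foldl PySem.Set.add (List.foldl PySem.Set.add [] xs ++ []) ys := by simp
    _ = _ := foldl_add_shift ys _ [] hmem

-- B's loop invariant: seen = set of the prefix, each bucket = deduped filter of the prefix
theorem ofList_append_singleton (q : List String) (u : String) :
    PySem.Set.ofList (q ++ [u]) = PySem.Set.add (PySem.Set.ofList q) u := by
  rw [PySem.Set.ofList_eq_foldl, List.foldl_append, ← PySem.Set.ofList_eq_foldl]; rfl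

theorem contains_ofList_true {q : List String} {u : String} (h : u ∈ q) :
    PySem.Set.contains (PySem.Set.ofList q) u = true := by
  simp [PySem.Set.contains, List.contains_eq_mem, PySem.Set.mem_ofList, h]

theorem contains_ofList_false {q : List String} {u : String} (h : u ∉ q) :
    PySem.Set.contains (PySem.Set.ofList q) u = false := by
  simp [PySem.Set.contains, List.contains_eq_mem, PySem.Set.mem_ofList, h]

theorem add_ofList_mem {q : List String} {u : String} (h : u ∈ q) :
    PySem.Set.add (PySem.Set.ofList q) u = PySem.Set.ofList q := by
  unfold PySem.Set.add; rw [if_pos (contains_ofList_true h)]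

theorem add_ofList_not_mem {q : List String} {u : String} (h : u ∉ q) :
    PySem.Set.add (PySem.Set.ofList q) u = PySem.Set.ofList q ++ [u] := by
  unfold PySem.Set.add; rw [if_neg (by rw [contains_ofList_false h]; exact Bool.false_ne_true)]

theorem B_inv (xs p : List String) :
    xs.foldl
      (fun (st : PySem.Set String × List String × List String × List String × List String) u =>
        if st.1.contains u then st
        else
          let s := pvScore u
          if s = 3 then (PySem.Set.add st.1 u, st.2.1 ++ [u], st.2.2.1, st.2.2.2.1, st.2.2.2.2)
          else if s = 2 then (PySem.Set.add st.1 u, st.2.1, st.2.2.1 ++ [u], st.2.2.2.1, st.2.2.2.2)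
          else if s = 1 then (PySem.Set.add st.1 u, st.2.1, st.2.2.1, st.2.2.2.1 ++ [u], st.2.2.2.2)
          else (PySem.Set.add st.1 u, st.2.1, st.2.2.1, st.2.2.2.1, st.2.2.2.2 ++ [u]))
      (PySem.Set.ofList p, PySem.Set.ofList (pvF 3 p), PySem.Set.ofList (pvF 2 p),
        PySem.Set.ofList (pvF 1 p), PySem.Set.ofList (pvF 0 p))
    = (PySem.Set.ofList (p ++ xs), PySem.Set.ofList (pvF 3 (p ++ xs)), PySem.Set.ofList (pvF 2 (p ++ xs)),
        PySem.Set.ofList (pvF 1 (p ++ xs)), PySem.Set.ofList (pvF 0 (p ++ xs))) := by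
  induction xs generalizing p with
  | nil => simp
  | cons u t ih =>
    have hFcons : ∀ i : Int, pvF i (p ++ [u]) =
        pvF i p ++ (if pvScore u = i then [u] else []) := by
      intro i; unfold pvF
      by_cases h : pvScore u = i <;> simp [List.filter_append, h]
    have hstep := ih (p ++ [u])
    rw [show (p ++ [u]) ++ t = p ++ u :: t by simp] at hstep
    by_cases hup : u ∈ p
    · have hc : PySem.Set.contains (PySem.Set.ofList p) u = true := contains_ofList_true hup
      have hp : PySem.Set.ofList (p ++ [u]) = PySem.Set.ofList p := by
        rw [ofList_append_singleton, add_ofList_mem hup]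
      have hFi : ∀ i : Int, PySem.Set.ofList (pvF i (p ++ [u])) = PySem.Set.ofList (pvF i p) := by
        intro i
        rw [hFcons i]
        by_cases h : pvScore u = i
        · have hmemF : u ∈ pvF i p := by unfold pvF; simp [hup, h]
          rw [if_pos h, ofList_append_singleton, add_ofList_mem hmemF]
        · simp [h]
      rw [hp, hFi 3, hFi 2, hFi 1, hFi 0] at hstep
      rw [List.foldl_cons]
      rw [show PySem.Set.contains (PySem.Set.ofList p) u = true from hc]
      simpa using hstep
    · have hc : PySem.Set.contains (PySem.Set.ofList p) u = false := contains_ofList_false hup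
      have hp : PySem.Set.ofList (p ++ [u]) = PySem.Set.ofList p ++ [u] := by
        rw [ofList_append_singleton, add_ofList_not_mem hup]
      have hFset : ∀ i : Int, PySem.Set.ofList (pvF i (p ++ [u])) =
          (if pvScore u = i then PySem.Set.ofList (pvF i p) ++ [u] else PySem.Set.ofList (pvF i p)) := by
        intro i
        rw [hFcons i]
        by_cases h : pvScore u = i
        · have hnm : u ∉ pvF i p := by
            unfold pvF; intro hm; exact hup (List.mem_filter.mp hm).1
          rw [if_pos h, if_pos h, ofList_append_singleton, add_ofList_not_mem hnm]
        · simp [h]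
      rw [hp, hFset 3, hFset 2, hFset 1, hFset 0] at hstep
      rw [List.foldl_cons]
      rw [show PySem.Set.contains (PySem.Set.ofList p) u = false from hc]
      rcases pvScore_cases u with hs | hs | hs | hs <;>
        simpa [hs, add_ofList_not_mem hup] using hstep

theorem B_char (urls : List String) :
    prioritize_images_py_alt urls =
      PySem.Set.ofList (pvF 3 urls) ++ PySem.Set.ofList (pvF 2 urls)
        ++ PySem.Set.ofList (pvF 1 urls) ++ PySem.Set.ofList (pvF 0 urls) := by
  unfold prioritize_images_py_alt
  have h := B_inv urls []
  simp only [List.nil_append] at h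
  have hnil : (PySem.Set.empty : PySem.Set String) = PySem.Set.ofList ([] : List String) := rfl
  rw [hnil]
  rw [show (PySem.Set.ofList ([] : List String), ([] : List String), ([] : List String),
        ([] : List String), ([] : List String))
      = (PySem.Set.ofList ([] : List String), PySem.Set.ofList (pvF 3 ([] : List String)),
         PySem.Set.ofList (pvF 2 ([] : List String)), PySem.Set.ofList (pvF 1 ([] : List String)),
         PySem.Set.ofList (pvF 0 ([] : List String))) from rfl, h]

theorem not_mem_F_of_score_ne {i : Int} {p : List String} {y : String}
    (h : pvScore y ≠ i) : y ∉ pvF i p := by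
  intro hm; exact h (pvScore_of_mem_F hm)

-- ===== VERDICT (by name: the statement is the Claim_ definition above) =====
theorem prioritize_images_py_spec : Claim_equal_prioritize_images_py := by
  intro urls _
  show prioritize_images_py urls = prioritize_images_py_alt urls
  rw [A_char, B_char, sorted_buckets]
  have d3 : ∀ y ∈ pvF 2 urls ++ pvF 1 urls ++ pvF 0 urls, y ∉ pvF 3 urls := by
    intro y hy
    simp only [List.mem_append] at hy
    rcases hy with (h | h) | h <;>
      exact not_mem_F_of_score_ne (by rw [pvScore_of_mem_F h]; norm_num)
  have d2 : ∀ y ∈ pvF 1 urls ++ pvF 0 urls, y ∉ pvF 2 urls := by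
    intro y hy
    simp only [List.mem_append] at hy
    rcases hy with h | h <;>
      exact not_mem_F_of_score_ne (by rw [pvScore_of_mem_F h]; norm_num)
  have d1 : ∀ y ∈ pvF 0 urls, y ∉ pvF 1 urls := by
    intro y hy
    exact not_mem_F_of_score_ne (by rw [pvScore_of_mem_F hy]; norm_num)
  rw [show pvF 3 urls ++ pvF 2 urls ++ pvF 1 urls ++ pvF 0 urls
        = pvF 3 urls ++ (pvF 2 urls ++ (pvF 1 urls ++ pvF 0 urls)) by simp [List.append_assoc]]
  rw [ofList_append_disjoint _ _ (by
    intro y hy; apply d3; simpa [List.append_assoc] using hy)]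
  rw [ofList_append_disjoint _ _ (by
    intro y hy; exact d2 y hy)]
  rw [ofList_append_disjoint _ _ d1]
  simp [List.append_assoc]
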